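-- pv_equiv track=rewrite | github.com/CSEN-SCU/csen-174-s26-team-project-course-planner | project/course_planner/utils/meeting_pattern_parse.py | _tokenize_days
-- ===== SOURCE A (Python) =====
-- def _tokenize_days(days_part: str) -> list[str]:
--     """Split day letters, treating ``Th`` before a bare ``T`` so ``TTh`` → Tue + Thu."""
--     s = days_part.replace(",", " ").strip()
--     if not s:
--         return []
--     tokens: list[str] = []
--     i = 0
--     n = len(s)
--     while i < n:
--         if s[i].isspace():
--             i += 1
--             continue
--         if i + 1 < n and s[i : i + 2].lower() == "th":
--             tokens.append("Th")
--             i += 2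
--             continue
--         ch = s[i]
--         if ch.upper() in "MTWRF":
--             tokens.append(ch.upper())
--         i += 1
--     return tokens
-- ===== SOURCE B (Python) =====
-- def _tokenize_days(days_part: str) -> list[str]:
--     """One-pass state machine: a pending T waits to pair with an h as Th."""
--     tokens: list[str] = []
--     pending = False  # a 'T'/'t' has been seen and may still pair with an 'h'
--     for ch in days_part:
--         if pending:
--             pending = False
--             if ch in "hH":
--                 tokens.append("Th")
--                 continue
--             tokens.append("T")
--         if ch in "tT":
--             pending = True
--         elif ch in "mMwWrRfF":
--             tokens.append(ch.upper())
--     if pending: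
--         tokens.append("T")
--     return tokens
-- ===== Notes on version B (the rewrite author's own statement) =====
-- stated objective: simpler
-- what changed: A preprocesses the string (comma replace, strip) and walks an index with a two-character slice lookahead; B is a single character pass with a pending-T flag that pairs a seen T/t with a following h/H, needing no preprocessing or index arithmetic.
import Mathlib
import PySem

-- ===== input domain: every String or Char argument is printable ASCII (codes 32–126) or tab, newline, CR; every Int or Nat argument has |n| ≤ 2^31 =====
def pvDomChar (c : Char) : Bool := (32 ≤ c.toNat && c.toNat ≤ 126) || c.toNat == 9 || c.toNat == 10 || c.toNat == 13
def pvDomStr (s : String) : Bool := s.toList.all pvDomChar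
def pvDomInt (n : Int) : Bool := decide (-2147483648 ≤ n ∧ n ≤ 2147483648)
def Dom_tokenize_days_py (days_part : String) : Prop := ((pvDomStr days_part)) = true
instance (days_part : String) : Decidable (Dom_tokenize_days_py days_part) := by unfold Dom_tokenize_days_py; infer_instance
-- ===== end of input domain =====

-- B replaces A's replace/strip preprocessing and index-with-lookahead scan by a single pass with a pending-T flag; objective: simpler, same value.

-- ===== PORT A =====
-- A's while loop: recursion over the remaining characters (the [c] arm is "i+1 = n", the
-- two-char arm is "i + 1 < n"); tokens is the list A appends to.
def pvLoopA : List Char → List String → List String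
  | [], tokens => tokens
  | [c], tokens =>
    if PySem.Chars.isspace c then pvLoopA [] tokens
    else pvLoopA [] (if PySem.Chars.isIn [PySem.Chars.upperChar c] "MTWRF".toList then tokens ++ [String.ofList [PySem.Chars.upperChar c]] else tokens)
  | c :: c2 :: rest2, tokens =>
    if PySem.Chars.isspace c then pvLoopA (c2 :: rest2) tokens
    else if PySem.Chars.lower [c, c2] = ['t', 'h'] then   -- s[i:i+2].lower() == "th"
      pvLoopA rest2 (tokens ++ ["Th"])
    else pvLoopA (c2 :: rest2) (if PySem.Chars.isIn [PySem.Chars.upperChar c] "MTWRF".toList then tokens ++ [String.ofList [PySem.Chars.upperChar c]] else tokens)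
  termination_by l _ => l.length
  decreasing_by all_goals (simp only [List.length_cons, List.length_nil]; omega)

def tokenize_days_py (days_part : String) : List String :=
  let s := PySem.Str.strip (PySem.Str.replace days_part "," " ")
  if s = "" then []
  else pvLoopA s.toList []

-- ===== PORT B =====
-- B's for loop: one pass, `pending` records a seen T/t still waiting for an h/H.
def pvLoopB : List Char → Bool → List String → List String
  | [], pending, tokens => if pending then tokens ++ ["T"] else tokens
  | c :: rest, pending, tokens =>
    if pending then
      if ("hH".toList).contains c then pvLoopB rest false (tokens ++ ["Th"])
      else  -- flush the pending "T", then handle c with pending cleared (the Python fall-through)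
        if ("tT".toList).contains c then pvLoopB rest true (tokens ++ ["T"])
        else if ("mMwWrRfF".toList).contains c then pvLoopB rest false ((tokens ++ ["T"]) ++ [String.ofList [PySem.Chars.upperChar c]])
        else pvLoopB rest false (tokens ++ ["T"])
    else
      if ("tT".toList).contains c then pvLoopB rest true tokens
      else if ("mMwWrRfF".toList).contains c then pvLoopB rest false (tokens ++ [String.ofList [PySem.Chars.upperChar c]])
      else pvLoopB rest false tokens

def tokenize_days_py_alt (days_part : String) : List String :=
  pvLoopB days_part.toList false []

-- ===== PRECONDITION & SPEC =====
def Spec_tokenize_days_py (days_part : String) (out : List String) : Prop := out = tokenize_days_py_alt days_part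
instance (days_part : String) (out : List String) : Decidable (Spec_tokenize_days_py days_part out) := by unfold Spec_tokenize_days_py; infer_instance

-- ===== CLAIM (what is proved, stated in full; the proofs are below) =====
def Claim_equal_tokenize_days_py : Prop := ∀ (days_part : String), Dom_tokenize_days_py days_part → Spec_tokenize_days_py days_part (tokenize_days_py days_part)

-- ===== LEMMAS AND PROOFS =====

lemma pvBne {b : Bool} (h : b = false) : ¬ (b = true) := by simp [h]

lemma pvStrT : String.ofList ['T'] = "T" := rfl

-- comma→space, the character action of A's `replace(",", " ")`
def pvRc (c : Char) : Char := if c = ',' then ' ' else c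

lemma pvRcKeepsDomain (c : Char) (h : pvDomChar c = true) : pvDomChar (pvRc c) = true := by
  unfold pvRc
  split_ifs with h'
  · decide
  · exact h

-- a decidable fact holding on the 127 domain codepoints holds on every domain char
lemma pvCharCases127 {P : Char → Prop} [DecidablePred P]
    (hall : ∀ n ∈ List.range 127, P (Char.ofNat n))
    (c : Char) (hc : pvDomChar c = true) : P c := by
  have hlt : c.toNat < 127 := by
    simp only [pvDomChar, Bool.or_eq_true, Bool.and_eq_true, decide_eq_true_eq, beq_iff_eq] at hc
    omega
  have := hall c.toNat (List.mem_range.mpr hlt)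
  simpa [Char.ofNat_toNat] using this

-- all character-level facts the equivalence needs, bundled
abbrev pvCharFacts (c : Char) : Prop :=
  (PySem.Chars.lowerChar c = 't' ↔ ("tT".toList).contains c = true)
  ∧ (PySem.Chars.lowerChar c = 'h' ↔ ("hH".toList).contains c = true)
  ∧ (PySem.Chars.isIn [PySem.Chars.upperChar c] "MTWRF".toList = (("tT".toList).contains c || ("mMwWrRfF".toList).contains c))
  ∧ (("tT".toList).contains c = true → PySem.Chars.upperChar c = 'T')
  ∧ (PySem.Chars.isspace c = true → ("tT".toList).contains c = false ∧ ("hH".toList).contains c = false ∧ ("mMwWrRfF".toList).contains c = false)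

set_option maxRecDepth 8192 in
lemma pvCharFacts_of_dom (c : Char) (h : pvDomChar c = true) : pvCharFacts c :=
  pvCharCases127 (by decide) c h

lemma pvRc_h (c : Char) (h : pvDomChar c = true) :
    (PySem.Chars.lowerChar (pvRc c) = 'h') ↔ ("hH".toList).contains c = true := by
  unfold pvRc
  split_ifs with h'
  · subst h'
    constructor
    · intro hx; exact absurd hx (by decide)
    · intro hx; exact absurd hx (by decide)
  · exact (pvCharFacts_of_dom c h).2.1

lemma pvLowerPair (a b : Char) :
    PySem.Chars.lower [a, b] = [PySem.Chars.lowerChar a, PySem.Chars.lowerChar b] := by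
  simp [PySem.Chars.lower]

lemma pvThCond (a b : Char) :
    PySem.Chars.lower [a, b] = ['t', 'h'] ↔
      (PySem.Chars.lowerChar a = 't' ∧ PySem.Chars.lowerChar b = 'h') := by
  rw [pvLowerPair]
  constructor
  · intro h
    injection h with h1 h2
    injection h2 with h2 _
    exact ⟨h1, h2⟩
  · rintro ⟨h1, h2⟩
    rw [h1, h2]

-- one-step unfoldings of pvLoopA
lemma pvStepA_nil (t : List String) : pvLoopA [] t = t := by simp only [pvLoopA]

lemma pvStepA_one (c : Char) (t : List String) :
    pvLoopA [c] t =
      if PySem.Chars.isspace c then pvLoopA [] t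
      else pvLoopA [] (if PySem.Chars.isIn [PySem.Chars.upperChar c] "MTWRF".toList then t ++ [String.ofList [PySem.Chars.upperChar c]] else t) := by
  simp only [pvLoopA]

lemma pvStepA_two (c c2 : Char) (r : List Char) (t : List String) :
    pvLoopA (c :: c2 :: r) t =
      if PySem.Chars.isspace c then pvLoopA (c2 :: r) t
      else if PySem.Chars.lower [c, c2] = ['t', 'h'] then pvLoopA r (t ++ ["Th"])
      else pvLoopA (c2 :: r) (if PySem.Chars.isIn [PySem.Chars.upperChar c] "MTWRF".toList then t ++ [String.ofList [PySem.Chars.upperChar c]] else t) := by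
  simp only [pvLoopA]

lemma pvStepA_space {c : Char} (h : PySem.Chars.isspace c = true) (rest : List Char) (t : List String) :
    pvLoopA (c :: rest) t = pvLoopA rest t := by
  cases rest with
  | nil => rw [pvStepA_one, if_pos h]
  | cons c2 r2 => rw [pvStepA_two, if_pos h]

lemma pvStepA_last {c : Char} (h : PySem.Chars.isspace c = false) (t : List String) :
    pvLoopA [c] t =
      if PySem.Chars.isIn [PySem.Chars.upperChar c] "MTWRF".toList then t ++ [String.ofList [PySem.Chars.upperChar c]] else t := by
  rw [pvStepA_one, if_neg (pvBne h), pvStepA_nil]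

lemma pvStepA_th {c c2 : Char} (h : PySem.Chars.isspace c = false)
    (h2 : PySem.Chars.lower [c, c2] = ['t', 'h']) (r : List Char) (t : List String) :
    pvLoopA (c :: c2 :: r) t = pvLoopA r (t ++ ["Th"]) := by
  rw [pvStepA_two, if_neg (pvBne h), if_pos h2]

lemma pvStepA_nth {c c2 : Char} (h : PySem.Chars.isspace c = false)
    (h2 : ¬ PySem.Chars.lower [c, c2] = ['t', 'h']) (r : List Char) (t : List String) :
    pvLoopA (c :: c2 :: r) t =
      pvLoopA (c2 :: r) (if PySem.Chars.isIn [PySem.Chars.upperChar c] "MTWRF".toList then t ++ [String.ofList [PySem.Chars.upperChar c]] else t) := by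
  rw [pvStepA_two, if_neg (pvBne h), if_neg h2]

-- one-step unfoldings of pvLoopB
lemma pvStepB_nil_true (t : List String) : pvLoopB [] true t = t ++ ["T"] := rfl

lemma pvStepB_nil_false (t : List String) : pvLoopB [] false t = t := rfl

lemma pvStepB_h {c : Char} (hh : ("hH".toList).contains c = true) (r : List Char) (t : List String) :
    pvLoopB (c :: r) true t = pvLoopB r false (t ++ ["Th"]) := by
  simp only [pvLoopB]
  rw [if_pos trivial, if_pos hh]

lemma pvStepB_flush {c : Char} (hh : ("hH".toList).contains c = false) (r : List Char) (t : List String) :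
    pvLoopB (c :: r) true t = pvLoopB (c :: r) false (t ++ ["T"]) := by
  simp only [pvLoopB]
  rw [if_pos trivial, if_neg (pvBne hh), if_neg Bool.false_ne_true]

lemma pvStepB_t {c : Char} (ht : ("tT".toList).contains c = true) (r : List Char) (t : List String) :
    pvLoopB (c :: r) false t = pvLoopB r true t := by
  simp only [pvLoopB]
  rw [if_neg Bool.false_ne_true, if_pos ht]

lemma pvStepB_m {c : Char} (ht : ("tT".toList).contains c = false)
    (hm : ("mMwWrRfF".toList).contains c = true) (r : List Char) (t : List String) :
    pvLoopB (c :: r) false t = pvLoopB r false (t ++ [String.ofList [PySem.Chars.upperChar c]]) := by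
  simp only [pvLoopB]
  rw [if_neg Bool.false_ne_true, if_neg (pvBne ht), if_pos hm]

lemma pvStepB_skip {c : Char} (ht : ("tT".toList).contains c = false)
    (hm : ("mMwWrRfF".toList).contains c = false) (r : List Char) (t : List String) :
    pvLoopB (c :: r) false t = pvLoopB r false t := by
  simp only [pvLoopB]
  rw [if_neg Bool.false_ne_true, if_neg (pvBne ht), if_neg (pvBne hm)]

-- a run of whitespace produces nothing
lemma pvLoopA_spaces (ws : List Char) (tokens : List String)
    (h : ∀ w ∈ ws, PySem.Chars.isspace w = true) : pvLoopA ws tokens = tokens := by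
  match ws with
  | [] => exact pvStepA_nil tokens
  | w :: ws2 =>
      rw [pvStepA_space (h w (List.mem_cons_self ..))]
      exact pvLoopA_spaces ws2 tokens fun x hx => h x (List.mem_cons_of_mem _ hx)
  termination_by ws.length
  decreasing_by simp only [List.length_cons]; omega

-- the "th" test fails when the second char is whitespace (in the domain)
lemma pvNotThOfSpace (c w : Char) (hwd : pvDomChar w = true)
    (hw : PySem.Chars.isspace w = true) : ¬ PySem.Chars.lower [c, w] = ['t', 'h'] := by
  intro hx
  have h2 : PySem.Chars.lowerChar w = 'h' := ((pvThCond c w).mp hx).2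
  have hcon := ((pvCharFacts_of_dom w hwd).2.1).mp h2
  have := ((pvCharFacts_of_dom w hwd).2.2.2.2 hw).2.1
  rw [this] at hcon
  exact absurd hcon (by decide)

-- A's loop ignores trailing whitespace
lemma pvLoopA_append_spaces (pre ws : List Char) (tokens : List String)
    (hwsdom : ∀ c ∈ ws, pvDomChar c = true)
    (hws : ∀ w ∈ ws, PySem.Chars.isspace w = true) :
    pvLoopA (pre ++ ws) tokens = pvLoopA pre tokens := by
  match pre with
  | [] => rw [List.nil_append, pvLoopA_spaces ws tokens hws, pvStepA_nil]
  | [c] =>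
      by_cases hsp : PySem.Chars.isspace c = true
      · have hL : pvLoopA ([c] ++ ws) tokens = tokens := by
          rw [List.cons_append, List.nil_append, pvStepA_space hsp, pvLoopA_spaces ws tokens hws]
        have hR : pvLoopA [c] tokens = tokens := by
          rw [pvStepA_space hsp, pvStepA_nil]
        rw [hL, hR]
      · have hsp' : PySem.Chars.isspace c = false := by
          cases hx : PySem.Chars.isspace c
          · rfl
          · exact absurd hx hsp
        match ws with
        | [] => rfl
        | w :: ws2 =>
            have hw := hws w (List.mem_cons_self ..)
            have hwd := hwsdom w (List.mem_cons_self ..)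
            have hlow := pvNotThOfSpace c w hwd hw
            have hL : pvLoopA ([c] ++ (w :: ws2)) tokens =
                (if PySem.Chars.isIn [PySem.Chars.upperChar c] "MTWRF".toList then tokens ++ [String.ofList [PySem.Chars.upperChar c]] else tokens) := by
              rw [List.cons_append, List.nil_append, pvStepA_nth hsp' hlow,
                pvStepA_space hw, pvLoopA_spaces ws2 _ fun x hx => hws x (List.mem_cons_of_mem _ hx)]
            rw [hL, pvStepA_last hsp']
  | c :: c2 :: r2 =>
      by_cases hsp : PySem.Chars.isspace c = true
      · have hL : pvLoopA ((c :: c2 :: r2) ++ ws) tokens = pvLoopA ((c2 :: r2) ++ ws) tokens := by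
          rw [List.cons_append]
          exact pvStepA_space hsp _ _
        rw [hL, pvLoopA_append_spaces (c2 :: r2) ws tokens hwsdom hws, pvStepA_space hsp]
      · have hsp' : PySem.Chars.isspace c = false := by
          cases hx : PySem.Chars.isspace c
          · rfl
          · exact absurd hx hsp
        by_cases hth : PySem.Chars.lower [c, c2] = ['t', 'h']
        · have hL : pvLoopA ((c :: c2 :: r2) ++ ws) tokens = pvLoopA (r2 ++ ws) (tokens ++ ["Th"]) := by
            rw [List.cons_append, List.cons_append]
            exact pvStepA_th hsp' hth _ _
          rw [hL, pvLoopA_append_spaces r2 ws _ hwsdom hws, pvStepA_th hsp' hth]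
        · have hL : pvLoopA ((c :: c2 :: r2) ++ ws) tokens =
              pvLoopA ((c2 :: r2) ++ ws) (if PySem.Chars.isIn [PySem.Chars.upperChar c] "MTWRF".toList then tokens ++ [String.ofList [PySem.Chars.upperChar c]] else tokens) := by
            rw [List.cons_append, List.cons_append]
            exact pvStepA_nth hsp' hth _ _
          rw [hL, pvLoopA_append_spaces (c2 :: r2) ws _ hwsdom hws, pvStepA_nth hsp' hth]
  termination_by pre.length
  decreasing_by all_goals (simp only [List.length_cons]; omega)

-- A's loop ignores leading whitespace
lemma pvLoopA_lstrip (l : List Char) (tokens : List String) :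
    pvLoopA (List.dropWhile PySem.Chars.isspace l) tokens = pvLoopA l tokens := by
  induction l with
  | nil => rfl
  | cons c rest ih =>
      by_cases hc : PySem.Chars.isspace c = true
      · rw [List.dropWhile_cons_of_pos hc, ih, pvStepA_space hc]
      · rw [List.dropWhile_cons_of_neg (by simp [hc])]

lemma pvLoopA_rstrip (l : List Char) (tokens : List String)
    (hdom : ∀ c ∈ l, pvDomChar c = true) :
    pvLoopA (PySem.Chars.rstrip l) tokens = pvLoopA l tokens := by
  have hsplit : PySem.Chars.rstrip l ++ (List.takeWhile PySem.Chars.isspace l.reverse).reverse = l := by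
    unfold PySem.Chars.rstrip
    rw [← List.reverse_append, List.takeWhile_append_dropWhile, List.reverse_reverse]
  have hmem : ∀ c ∈ (List.takeWhile PySem.Chars.isspace l.reverse).reverse, c ∈ l := by
    intro c hc
    rw [List.mem_reverse] at hc
    have := (List.takeWhile_prefix _).sublist.subset hc
    rwa [List.mem_reverse] at this
  calc pvLoopA (PySem.Chars.rstrip l) tokens
      = pvLoopA (PySem.Chars.rstrip l ++ (List.takeWhile PySem.Chars.isspace l.reverse).reverse) tokens := by
        rw [pvLoopA_append_spaces _ _ _ (fun c hc => hdom c (hmem c hc))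
          (fun w hw => List.mem_takeWhile_imp (List.mem_reverse.mp hw))]
    _ = pvLoopA l tokens := by rw [hsplit]

-- replace(",", " ") acts charwise
lemma pvReplace_go (fuel : Nat) (l : List Char) (acc : List Char) (h : l.length ≤ fuel) :
    PySem.Chars.replace.go [','] [' '] fuel l acc = acc.reverse ++ l.map pvRc := by
  induction fuel generalizing l acc with
  | zero =>
      have : l = [] := List.length_eq_zero_iff.mp (Nat.le_zero.mp h)
      subst this
      simp [PySem.Chars.replace.go]
  | succ fuel ih =>
      match l with
      | [] => simp [PySem.Chars.replace.go]
      | c :: t =>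
          by_cases hc : c = ','
          · subst hc
            have hpre : List.isPrefixOf [','] (',' :: t) = true := by
              simp [List.isPrefixOf]
            simp only [PySem.Chars.replace.go, hpre, if_true]
            simp only [List.length_cons, List.length_nil, List.drop_succ_cons, List.drop_zero,
              List.reverse_cons, List.reverse_nil, List.nil_append, List.singleton_append]
            rw [ih t (' ' :: acc) (by simpa using Nat.le_of_succ_le_succ h)]
            simp [pvRc, List.reverse_cons, List.append_assoc]
          · have hceq : (',' == c) = false := beq_eq_false_iff_ne.mpr fun hx => hc hx.symm
            have hpre : List.isPrefixOf [','] (c :: t) = false := by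
              simp [List.isPrefixOf, hceq]
            simp only [PySem.Chars.replace.go, hpre, Bool.false_eq_true, if_false]
            rw [ih t (c :: acc) (by simpa using Nat.le_of_succ_le_succ h)]
            simp [pvRc, hc, List.reverse_cons, List.append_assoc]

lemma pvReplace_comma (l : List Char) :
    PySem.Chars.replace l [','] [' '] = l.map pvRc := by
  unfold PySem.Chars.replace
  simp only [List.isEmpty_cons, Bool.false_eq_true, if_false]
  rw [pvReplace_go l.length l [] le_rfl]
  rfl

-- the heart: A's scan over the comma-replaced characters = B's one-pass state machine
lemma pvLoopA_eq_pvLoopB (l : List Char) (tokens : List String)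
    (hdom : ∀ c ∈ l, pvDomChar c = true) :
    pvLoopA (l.map pvRc) tokens = pvLoopB l false tokens := by
  match l with
  | [] => rw [List.map_nil, pvStepA_nil, pvStepB_nil_false]
  | c :: rest =>
      have hdomc := hdom c (List.mem_cons_self ..)
      have hdomrest : ∀ x ∈ rest, pvDomChar x = true := fun x hx => hdom x (List.mem_cons_of_mem _ hx)
      obtain ⟨f1, f2, f3, f4, f5⟩ := pvCharFacts_of_dom c hdomc
      by_cases hcomma : c = ','
      · subst hcomma
        have hrc : pvRc ',' = ' ' := by decide
        rw [List.map_cons, hrc, pvStepA_space (by decide),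
          pvStepB_skip (by decide) (by decide)]
        exact pvLoopA_eq_pvLoopB rest tokens hdomrest
      · have hrc : pvRc c = c := by simp [pvRc, hcomma]
        by_cases hs : PySem.Chars.isspace c = true
        · obtain ⟨g1, g2, g3⟩ := f5 hs
          rw [List.map_cons, hrc, pvStepA_space hs, pvStepB_skip g1 g3]
          exact pvLoopA_eq_pvLoopB rest tokens hdomrest
        · have hs' : PySem.Chars.isspace c = false := by
            cases hx : PySem.Chars.isspace c
            · rfl
            · exact absurd hx hs
          by_cases ht : ("tT".toList).contains c = true
          · have hup := f4 ht
            have hlc : PySem.Chars.lowerChar c = 't' := f1.mpr ht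
            have hday : PySem.Chars.isIn [PySem.Chars.upperChar c] "MTWRF".toList = true := by
              rw [f3, ht]; rfl
            match rest with
            | [] =>
                rw [List.map_cons, List.map_nil, hrc, pvStepA_last hs', if_pos hday, hup,
                  pvStepB_t ht, pvStepB_nil_true, pvStrT]
            | c2 :: rest2 =>
                have hdom2 := hdomrest c2 (List.mem_cons_self ..)
                have hh2 := pvRc_h c2 hdom2
                by_cases hh : ("hH".toList).contains c2 = true
                · have hlow : PySem.Chars.lower [c, pvRc c2] = ['t', 'h'] :=
                    (pvThCond _ _).mpr ⟨hlc, hh2.mpr hh⟩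
                  rw [List.map_cons, List.map_cons, hrc, pvStepA_th hs' hlow,
                    pvStepB_t ht, pvStepB_h hh]
                  exact pvLoopA_eq_pvLoopB rest2 (tokens ++ ["Th"])
                    fun x hx => hdomrest x (List.mem_cons_of_mem _ hx)
                · have hh' : ("hH".toList).contains c2 = false := by
                    cases hx : ("hH".toList).contains c2
                    · rfl
                    · exact absurd hx hh
                  have hlow : ¬ PySem.Chars.lower [c, pvRc c2] = ['t', 'h'] := by
                    intro hx
                    have := ((pvThCond _ _).mp hx).2
                    rw [hh2.mp this] at hh'
                    exact absurd hh' (by decide)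
                  have hA : pvLoopA (List.map pvRc (c :: c2 :: rest2)) tokens =
                      pvLoopA (List.map pvRc (c2 :: rest2)) (tokens ++ ["T"]) := by
                    rw [List.map_cons, List.map_cons, hrc, pvStepA_nth hs' hlow, if_pos hday, hup,
                      pvStrT]
                  rw [hA, pvStepB_t ht, pvStepB_flush hh']
                  exact pvLoopA_eq_pvLoopB (c2 :: rest2) (tokens ++ ["T"]) hdomrest
          · have ht' : ("tT".toList).contains c = false := by
              cases hx : ("tT".toList).contains c
              · rfl
              · exact absurd hx ht
            have hnt : ¬ PySem.Chars.lowerChar c = 't' := fun hx => by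
              have := f1.mp hx
              rw [ht'] at this
              exact absurd this (by decide)
            have hdayEq : PySem.Chars.isIn [PySem.Chars.upperChar c] "MTWRF".toList =
                ("mMwWrRfF".toList).contains c := by
              rw [f3, ht', Bool.false_or]
            by_cases hm : ("mMwWrRfF".toList).contains c = true
            · have hday : PySem.Chars.isIn [PySem.Chars.upperChar c] "MTWRF".toList = true := by
                rw [hdayEq, hm]
              match rest with
              | [] =>
                  rw [List.map_cons, List.map_nil, hrc, pvStepA_last hs', if_pos hday,
                    pvStepB_m ht' hm, pvStepB_nil_false]
              | c2 :: rest2 =>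
                  have hlow : ¬ PySem.Chars.lower [c, pvRc c2] = ['t', 'h'] := fun hx =>
                    hnt ((pvThCond _ _).mp hx).1
                  have hA : pvLoopA (List.map pvRc (c :: c2 :: rest2)) tokens =
                      pvLoopA (List.map pvRc (c2 :: rest2))
                        (tokens ++ [String.ofList [PySem.Chars.upperChar c]]) := by
                    rw [List.map_cons, List.map_cons, hrc, pvStepA_nth hs' hlow, if_pos hday]
                  rw [hA, pvStepB_m ht' hm]
                  exact pvLoopA_eq_pvLoopB (c2 :: rest2) _ hdomrest
            · have hm' : ("mMwWrRfF".toList).contains c = false := by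
                cases hx : ("mMwWrRfF".toList).contains c
                · rfl
                · exact absurd hx hm
              have hday : PySem.Chars.isIn [PySem.Chars.upperChar c] "MTWRF".toList = false := by
                rw [hdayEq, hm']
              match rest with
              | [] =>
                  rw [List.map_cons, List.map_nil, hrc, pvStepA_last hs', if_neg (pvBne hday),
                    pvStepB_skip ht' hm', pvStepB_nil_false]
              | c2 :: rest2 =>
                  have hlow : ¬ PySem.Chars.lower [c, pvRc c2] = ['t', 'h'] := fun hx =>
                    hnt ((pvThCond _ _).mp hx).1
                  have hA : pvLoopA (List.map pvRc (c :: c2 :: rest2)) tokens =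
                      pvLoopA (List.map pvRc (c2 :: rest2)) tokens := by
                    rw [List.map_cons, List.map_cons, hrc, pvStepA_nth hs' hlow,
                      if_neg (pvBne hday)]
                  rw [hA, pvStepB_skip ht' hm']
                  exact pvLoopA_eq_pvLoopB (c2 :: rest2) tokens hdomrest
  termination_by l.length
  decreasing_by all_goals (simp only [List.length_cons]; omega)

-- ===== VERDICT (by name: the statement is the Claim_ definition above) =====
theorem tokenize_days_py_spec : Claim_equal_tokenize_days_py := by
  intro s hdom
  unfold Spec_tokenize_days_py tokenize_days_py tokenize_days_py_alt
  have hdom' : ∀ c ∈ s.toList, pvDomChar c = true := by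
    have h := hdom; unfold Dom_tokenize_days_py pvDomStr at h
    exact fun c hc => List.all_eq_true.mp h c hc
  have hL : (PySem.Str.strip (PySem.Str.replace s "," " ")).toList
      = PySem.Chars.strip (s.toList.map pvRc) := by
    rw [PySem.Str.toList_strip, PySem.Str.toList_replace]
    have h1 : ("," : String).toList = [','] := rfl
    have h2 : (" " : String).toList = [' '] := rfl
    rw [h1, h2, pvReplace_comma]
  have hdomrc : ∀ c ∈ s.toList.map pvRc, pvDomChar c = true := by
    intro c hc
    rcases List.mem_map.mp hc with ⟨a, ha, rfl⟩
    exact pvRcKeepsDomain a (hdom' a ha)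
  have key : pvLoopA (PySem.Chars.strip (s.toList.map pvRc)) [] = pvLoopB s.toList false [] := by
    unfold PySem.Chars.strip
    rw [pvLoopA_rstrip _ _ (by
      intro c hc
      exact hdomrc c ((List.dropWhile_suffix _).sublist.subset hc))]
    unfold PySem.Chars.lstrip
    rw [pvLoopA_lstrip]
    exact pvLoopA_eq_pvLoopB s.toList [] hdom'
  show (if PySem.Str.strip (PySem.Str.replace s "," " ") = "" then []
      else pvLoopA (PySem.Str.strip (PySem.Str.replace s "," " ")).toList []) = pvLoopB s.toList false []
  split_ifs with hemp
  · have hnil : (PySem.Str.strip (PySem.Str.replace s "," " ")).toList = [] := by rw [hemp]; rfl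
    rw [hL] at hnil
    rw [← key, hnil, pvStepA_nil]
  · rw [hL, key]
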